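-- pv_equiv track=rewrite | github.com/MartinJanev/advent-of-code-2024 | advent-of-code/day8/day8.py | get_antenna_positions
-- ===== SOURCE A (Python) =====
-- def get_antenna_positions(lines):
--     size_y = len(lines)
--     size_x = len(lines[0])
--
--     nodes_dict = {}
--     for y in range(size_y):
--         for x in range(size_x):
--             node = lines[y][x]
--             if node != '.':
--                 if node not in nodes_dict:
--                     nodes_dict[node] = []
--                 nodes_dict[node].append((y, x))
--     return nodes_dict
-- ===== SOURCE B (Python) =====
-- def get_antenna_positions(lines):
--     width = len(lines[0])
--     cells = [(row[x], (y, x)) for y, row in enumerate(lines) for x in range(width)]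
--     hits = [(s, p) for s, p in cells if s != '.']
--     order = list(dict.fromkeys(s for s, _ in hits))
--     return {s: [p for t, p in hits if t == s] for s in order}
-- ===== Notes on version B (the rewrite author's own statement) =====
-- stated objective: alternative
-- what changed: B replaces A's scan-and-bucket dict building with a collect-then-group decomposition: it flattens the grid into a (symbol, position) list in one comprehension, filters out '.', takes the symbols in first-occurrence order via dict.fromkeys, and builds each bucket by a per-symbol filter pass.
import Mathlib
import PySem

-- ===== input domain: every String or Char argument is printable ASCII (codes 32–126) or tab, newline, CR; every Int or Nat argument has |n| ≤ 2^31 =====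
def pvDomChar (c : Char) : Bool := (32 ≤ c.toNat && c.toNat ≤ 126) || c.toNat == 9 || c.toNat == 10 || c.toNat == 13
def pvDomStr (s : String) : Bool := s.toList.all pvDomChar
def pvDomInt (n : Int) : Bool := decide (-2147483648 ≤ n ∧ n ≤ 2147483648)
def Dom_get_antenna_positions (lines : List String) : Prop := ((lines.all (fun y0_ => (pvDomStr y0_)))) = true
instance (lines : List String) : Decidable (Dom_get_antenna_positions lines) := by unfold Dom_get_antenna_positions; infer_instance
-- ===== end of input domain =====

-- B builds the same symbol → positions map by a collect-then-group decomposition instead of A's scan-and-bucket loop (objective: alternative).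

-- ===== PORT A =====
def get_antenna_positions (lines : List String) : List (String × List (Int × Int)) :=
  let size_y : Int := lines.length
  let size_x : Int := PySem.Str.len (PySem.List.pyGetD lines 0 "")
  let d := (PySem.List.pyRange 0 size_y 1).foldl (fun d y =>
    (PySem.List.pyRange 0 size_x 1).foldl (fun d x =>
      let node : String := String.ofList [PySem.List.pyGetD (PySem.List.pyGetD lines y "").toList x ' ']
      if node ≠ "." then
        let d := if d.contains node = false then d.insert node ([] : List (Int × Int)) else d
        d.modify node [] (fun l => l ++ [(y, x)])
      else d) d) PySem.Dict.empty
  d.items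

-- ===== PORT B =====
def get_antenna_positions_alt (lines : List String) : List (String × List (Int × Int)) :=
  let width : Int := PySem.Str.len (PySem.List.pyGetD lines 0 "")
  let cells : List (String × (Int × Int)) :=
    (PySem.List.enumerate lines 0).flatMap (fun yr =>
      (PySem.List.pyRange 0 width 1).map (fun x =>
        (String.ofList [PySem.List.pyGetD yr.2.toList x ' '], (yr.1, x))))
  let hits := cells.filter (fun c => c.1 ≠ ".")
  let order := PySem.List.dedup (hits.map (·.1))
  order.map (fun s => (s, (hits.filter (fun c => c.1 == s)).map (·.2)))

-- ===== PRECONDITION & SPEC =====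
-- Pre_ excludes exactly the inputs where Python A raises IndexError: the empty list
-- (lines[0]) and grids with a row shorter than the first row (lines[y][x]).
def Pre_get_antenna_positions (lines : List String) : Prop :=
  lines ≠ [] ∧ ∀ s ∈ lines, PySem.Str.len (PySem.List.pyGetD lines 0 "") ≤ PySem.Str.len s
instance (lines : List String) : Decidable (Pre_get_antenna_positions lines) := by
  unfold Pre_get_antenna_positions; infer_instance
def pvWitness_get_antenna_positions : List String := ["a.b", "..a"]
def Spec_get_antenna_positions (lines : List String) (out : List (String × List (Int × Int))) : Prop := out = get_antenna_positions_alt lines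
instance (lines : List String) (out : List (String × List (Int × Int))) : Decidable (Spec_get_antenna_positions lines out) := by unfold Spec_get_antenna_positions; infer_instance

-- ===== CLAIM (what is proved, stated in full; the proofs are below) =====
def Claim_equal_get_antenna_positions : Prop := ∀ (lines : List String), Dom_get_antenna_positions lines → Pre_get_antenna_positions lines → Spec_get_antenna_positions lines (get_antenna_positions lines)

-- ===== LEMMAS AND PROOFS =====

-- A's "setdefault then append" body equals a single modify-append on the dict
theorem pvStepA_eq (d : PySem.Dict String (List (Int × Int))) (k : String) (p : Int × Int) :
    (if d.contains k = false then d.insert k ([] : List (Int × Int)) else d).modify k []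
        (fun l => l ++ [p])
      = d.modify k [] (fun l => l ++ [p]) := by
  cases h : d.contains k with
  | true => simp
  | false =>
      simp only [if_pos, PySem.Dict.modify, PySem.Dict.getD_insert_self,
        PySem.Dict.insert_insert_self, PySem.Dict.getD_of_not_contains d ([] : List (Int × Int)) h]

-- items of the grouping fold = keys in first-occurrence order, each with its filtered bucket
theorem pvItems_groupfold (l : List (String × (Int × Int))) :
    (l.foldl (fun d (c : String × (Int × Int)) => d.modify c.1 [] (fun v => v ++ [c.2]))
        PySem.Dict.empty).items
      = (PySem.List.dedup (l.map (·.1))).map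
          (fun s => (s, (l.filter (fun c => c.1 == s)).map (·.2))) := by
  have hnd : (l.foldl (fun d (c : String × (Int × Int)) => d.modify c.1 [] (fun v => v ++ [c.2]))
      PySem.Dict.empty).keys.Nodup :=
    PySem.Dict.nodup_keys_foldl_modify_key l (fun c => c.1) [] (fun _ c v => v ++ [c.2])
      PySem.Dict.empty PySem.Dict.nodup_keys_empty
  have hkeys : (l.foldl (fun d (c : String × (Int × Int)) => d.modify c.1 [] (fun v => v ++ [c.2]))
      PySem.Dict.empty).keys = PySem.Set.update PySem.Dict.empty.keys (l.map (fun c => c.1)) :=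
    PySem.Dict.keys_foldl_modify_key l (fun c => c.1) [] (fun _ c v => v ++ [c.2]) PySem.Dict.empty
  have hkeys' : PySem.Set.update (PySem.Dict.empty (κ := String) (ν := List (Int × Int))).keys
      (l.map (fun c => c.1)) = PySem.List.dedup (l.map (·.1)) := by
    simp [PySem.Set.update, PySem.Set.ofList, PySem.Set.empty, PySem.Dict.keys_empty,
      PySem.List.dedup_eq_ofList]
  rw [PySem.Dict.items_eq_map_keys _ hnd [], hkeys, hkeys']
  refine List.map_congr_left (fun s _ => ?_)
  have hget : (l.foldl (fun d (c : String × (Int × Int)) => d.modify c.1 [] (fun v => v ++ [c.2]))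
        PySem.Dict.empty).getD s []
      = PySem.Dict.empty.getD s [] ++ (l.filter (fun c => c.1 == s)).map (·.2) :=
    PySem.Dict.getD_foldl_modify_append l PySem.Dict.empty s
  rw [hget, PySem.Dict.getD_empty, List.nil_append]

theorem get_antenna_positions_main (lines : List String) :
    get_antenna_positions lines = get_antenna_positions_alt lines := by
  unfold get_antenna_positions get_antenna_positions_alt
  rw [← pvItems_groupfold]
  rw [List.foldl_filter, List.foldl_flatMap, PySem.List.enumerate_eq_map_pyRange lines "",
    List.foldl_map]
  simp only [PySem.List.len_eq]
  refine congrArg PySem.Dict.items ?_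
  refine PySem.List.foldl_congr_mem _ _ _ _ (fun d y _ => ?_)
  rw [List.foldl_map]
  refine PySem.List.foldl_congr_mem _ _ _ _ (fun d x _ => ?_)
  by_cases hn : String.ofList [PySem.List.pyGetD (PySem.List.pyGetD lines y "").toList x ' '] = "."
  · simp [hn]
  · simp only [hn, ne_eq, not_false_iff, if_pos, pvStepA_eq]
    simp

-- ===== VERDICT (by name: the statement is the Claim_ definition above) =====
theorem get_antenna_positions_spec : Claim_equal_get_antenna_positions := by
  intro lines _ _
  exact get_antenna_positions_main lines
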